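-- pv_equiv track=rewrite | github.com/Gabrielbs182/CalcIPV4PY | calc.py | coletar
-- ===== SOURCE A (Python) =====
-- def dec2bin(a): #calculadora que vai converter o indice da lista em binario.
--
--   i = 0
--   result = ''
--   lista = []
--   while a>1:
--     i = a%2
--     lista.append (i)
--     a = a//2
--   if a == 1:
--     lista.append (1)
--   while (len(lista))<8: #Deixar o numero sempre sendo um octeto de bit
--     lista.append(0)
--   lista.reverse()
--   for b in lista:  #transformando a lista em uma string
--     result += str(b)
--   return result
--
-- def coletar(n,lista): #Faz a coleta dos dados e calcula.
--
--   resultado = ""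
--   for x in range (len(lista)):
--     a = lista[x]
--     result = dec2bin(a)
--     if x != 3: #Essa condicional evita que seja concatenado junto a string um ponto extra no final
--       resultado+=result+'.'
--     else:
--       resultado+=result
--   return resultado
-- ===== SOURCE B (Python) =====
-- # B: dec2bin rebuilt as MSB-first recursion over the value (g(a) = g(a//2) + bit),
-- # left-padded with zfill(8); coletar as a join over enumerate instead of the index loop with string +=.
-- def dec2bin(a):
--     def g(a):
--         if a < 1:
--             return ''
--         return g(a // 2) + str(a % 2)
--     return g(a).zfill(8)
--
-- def coletar(n, lista):
--     return ''.join(dec2bin(a) + ('.' if x != 3 else '') for x, a in enumerate(lista))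
-- ===== Notes on version B (the rewrite author's own statement) =====
-- stated objective: simpler
-- what changed: dec2bin is rebuilt as an MSB-first recursion over the value (g(a)=g(a//2)+bit, then zfill(8)) instead of A's LSB digit list plus pad-loop plus reverse plus string-building loop, and coletar becomes a single ''.join over enumerate instead of the range loop with string +=.
import Mathlib
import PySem

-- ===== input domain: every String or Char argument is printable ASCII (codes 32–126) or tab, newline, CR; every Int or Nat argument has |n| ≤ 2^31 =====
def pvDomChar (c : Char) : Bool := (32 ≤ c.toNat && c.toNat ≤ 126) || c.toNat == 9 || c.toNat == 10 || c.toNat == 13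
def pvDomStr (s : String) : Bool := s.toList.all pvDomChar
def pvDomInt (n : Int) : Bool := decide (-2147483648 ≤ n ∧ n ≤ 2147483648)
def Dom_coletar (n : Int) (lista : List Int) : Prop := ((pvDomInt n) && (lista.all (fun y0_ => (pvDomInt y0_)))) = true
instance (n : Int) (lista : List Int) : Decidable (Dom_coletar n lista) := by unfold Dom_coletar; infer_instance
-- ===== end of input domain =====

-- B rebuilds dec2bin as an MSB-first recursion over the value (zfill-padded) instead of
-- A's LSB digit list + pad + reverse, and coletar as a join over enumerate instead of the
-- range loop with string accumulation (objective: simpler decomposition; same cost).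

-- ===== PORT A =====
-- the 'while a>1' loop of dec2bin: returns (lista, final a)
def dec2binA_loop (a : Int) (acc : List Int) : List Int × Int :=
  if a > 1 then dec2binA_loop (PySem.Int.floordiv a 2) (acc ++ [PySem.Int.mod a 2]) else (acc, a)
termination_by a.toNat
decreasing_by
  have h2 : PySem.Int.floordiv a 2 = a / 2 := PySem.Int.floordiv_eq_ediv_of_pos (by omega)
  omega

-- the 'while len(lista)<8: lista.append(0)' loop
def dec2binA_pad (l : List Int) : List Int :=
  if l.length < 8 then dec2binA_pad (l ++ [0]) else l
termination_by 8 - l.length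
decreasing_by simp; omega

def dec2binA (a : Int) : String :=
  let p := dec2binA_loop a []
  let lista := if p.2 = 1 then p.1 ++ [1] else p.1
  let lista2 := (dec2binA_pad lista).reverse
  lista2.foldl (fun result b => result ++ PySem.Int.toStr b) ""

def coletar (n : Int) (lista : List Int) : String :=
  (PySem.List.pyRange 0 lista.length 1).foldl (fun resultado x =>
    -- lista[x]: x drawn from range(len(lista)), always in range
    let a := PySem.List.pyGetD lista x 0
    let result := dec2binA a
    if x ≠ 3 then resultado ++ (result ++ ".") else resultado ++ result) ""

-- ===== PORT B =====
def dec2binB_g (a : Int) : String :=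
  if a < 1 then "" else dec2binB_g (PySem.Int.floordiv a 2) ++ PySem.Int.toStr (PySem.Int.mod a 2)
termination_by a.toNat
decreasing_by
  have h2 : PySem.Int.floordiv a 2 = a / 2 := PySem.Int.floordiv_eq_ediv_of_pos (by omega)
  omega

def dec2binB (a : Int) : String := PySem.Str.zfill (dec2binB_g a) 8

def coletar_alt (n : Int) (lista : List Int) : String :=
  PySem.Str.join "" ((PySem.List.enumerate lista 0).map
    (fun p => dec2binB p.2 ++ (if p.1 ≠ 3 then "." else "")))

-- ===== PRECONDITION & SPEC =====
def Spec_coletar (n : Int) (lista : List Int) (out : String) : Prop := out = coletar_alt n lista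
instance (n : Int) (lista : List Int) (out : String) : Decidable (Spec_coletar n lista out) := by unfold Spec_coletar; infer_instance

-- ===== CLAIM (what is proved, stated in full; the proofs are below) =====
def Claim_equal_coletar : Prop := ∀ (n : Int) (lista : List Int), Dom_coletar n lista → Spec_coletar n lista (coletar n lista)

-- ===== LEMMAS AND PROOFS =====

-- mathematical description of A's digit collection
def coreBits (a : Int) : List Int :=
  if a > 1 then PySem.Int.mod a 2 :: coreBits (PySem.Int.floordiv a 2) else []
termination_by a.toNat
decreasing_by
  have h2 : PySem.Int.floordiv a 2 = a / 2 := PySem.Int.floordiv_eq_ediv_of_pos (by omega)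
  omega

def finVal (a : Int) : Int :=
  if a > 1 then finVal (PySem.Int.floordiv a 2) else a
termination_by a.toNat
decreasing_by
  have h2 : PySem.Int.floordiv a 2 = a / 2 := PySem.Int.floordiv_eq_ediv_of_pos (by omega)
  omega

def fullBits (a : Int) : List Int :=
  if finVal a = 1 then coreBits a ++ [1] else coreBits a

theorem coreBits_pos (a : Int) (h : a > 1) :
    coreBits a = PySem.Int.mod a 2 :: coreBits (PySem.Int.floordiv a 2) := by
  rw [coreBits]; exact if_pos h

theorem coreBits_le (a : Int) (h : ¬ a > 1) : coreBits a = [] := by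
  rw [coreBits]; exact if_neg h

theorem finVal_pos (a : Int) (h : a > 1) : finVal a = finVal (PySem.Int.floordiv a 2) := by
  rw [finVal]; exact if_pos h

theorem finVal_le (a : Int) (h : ¬ a > 1) : finVal a = a := by
  rw [finVal]; exact if_neg h

theorem loopA_spec (a : Int) (acc : List Int) :
    dec2binA_loop a acc = (acc ++ coreBits a, finVal a) := by
  induction a, acc using dec2binA_loop.induct with
  | case1 a acc h ih =>
    rw [dec2binA_loop, if_pos h, ih, coreBits_pos a h, finVal_pos a h]
    simp
  | case2 a acc h =>
    rw [dec2binA_loop, if_neg h, coreBits_le a h, finVal_le a h]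
    simp

theorem fullBits_le (a : Int) (h : a < 1) : fullBits a = [] := by
  unfold fullBits
  rw [coreBits_le a (by omega), finVal_le a (by omega), if_neg (by omega)]

theorem fullBits_one : fullBits 1 = [1] := by
  unfold fullBits
  rw [coreBits_le 1 (by omega), finVal_le 1 (by omega)]
  simp

theorem fullBits_of_gt (a : Int) (h : a > 1) :
    fullBits a = PySem.Int.mod a 2 :: fullBits (PySem.Int.floordiv a 2) := by
  unfold fullBits
  rw [coreBits_pos a h, finVal_pos a h]
  split <;> simp

theorem bits01 (a : Int) : ∀ b ∈ fullBits a, b = 0 ∨ b = 1 := by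
  have core : ∀ a, ∀ b ∈ coreBits a, b = 0 ∨ b = 1 := by
    intro a
    induction a using coreBits.induct with
    | case1 a h ih =>
      rw [coreBits_pos a h]
      intro b hb
      rcases List.mem_cons.mp hb with hb | hb
      · subst hb
        have h1 := PySem.Int.mod_nonneg a (b := 2) (by omega)
        have h2 := PySem.Int.mod_lt a (b := 2) (by omega)
        omega
      · exact ih b hb
    | case2 a h => rw [coreBits_le a h]; simp
  intro b hb
  unfold fullBits at hb
  split at hb
  · rcases List.mem_append.mp hb with hb | hb
    · exact core a b hb
    · simp at hb; omega
  · exact core a b hb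

theorem toChars_01 (b : Int) (h : b = 0 ∨ b = 1) :
    PySem.Int.toChars b = [if b = 1 then '1' else '0'] := by
  rcases h with h | h <;> subst h <;> decide

-- the string-building loop of dec2bin
def strOf (l : List Int) : String := l.foldl (fun r b => r ++ PySem.Int.toStr b) ""

theorem strOf_from (l : List Int) : ∀ s : String,
    l.foldl (fun r b => r ++ PySem.Int.toStr b) s = s ++ strOf l := by
  induction l with
  | nil => intro s; simp [strOf]
  | cons b t ih =>
    intro s
    have h2 : strOf (b :: t) = PySem.Int.toStr b ++ strOf t := by
      unfold strOf
      simp only [List.foldl_cons]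
      rw [ih]
      simp [strOf]
    simp only [List.foldl_cons]
    rw [ih, h2, String.append_assoc]

theorem strOf_append (l₁ l₂ : List Int) : strOf (l₁ ++ l₂) = strOf l₁ ++ strOf l₂ := by
  unfold strOf
  rw [List.foldl_append, strOf_from]
  rfl

theorem strOf_toList (l : List Int) :
    (strOf l).toList = (l.map PySem.Int.toChars).flatten := by
  induction l with
  | nil => simp [strOf]
  | cons b t ih =>
    have h2 : strOf (b :: t) = strOf [b] ++ strOf t := strOf_append [b] t
    rw [h2, String.toList_append, ih]
    simp [strOf, PySem.Int.toList_toStr]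

theorem gB_eq (a : Int) : dec2binB_g a = strOf (fullBits a).reverse := by
  induction a using dec2binB_g.induct with
  | case1 a h =>
    rw [dec2binB_g, if_pos h, fullBits_le a h]
    simp [strOf]
  | case2 a h ih =>
    rw [dec2binB_g, if_neg h, ih]
    by_cases hgt : a > 1
    · rw [fullBits_of_gt a hgt]
      simp only [List.reverse_cons]
      rw [strOf_append]
      simp [strOf]
    · -- a = 1
      have ha : a = 1 := by omega
      subst ha
      have h0 : PySem.Int.floordiv 1 2 = 0 := by decide
      have hm : PySem.Int.mod 1 2 = 1 := by decide
      rw [h0, hm, fullBits_le 0 (by omega), fullBits_one]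
      simp [strOf]

theorem pad_eq (l : List Int) :
    dec2binA_pad l = l ++ List.replicate (8 - l.length) 0 := by
  induction l using dec2binA_pad.induct with
  | case1 l h ih =>
    rw [dec2binA_pad, if_pos h, ih]
    have h8 : 8 - l.length = (8 - (l.length + 1)) + 1 := by omega
    rw [h8, List.replicate_succ]
    simp
  | case2 l h =>
    rw [dec2binA_pad, if_neg h]
    have h8 : 8 - l.length = 0 := by omega
    rw [h8]
    simp

theorem flatten_replicate_zero (k : Nat) :
    ((List.replicate k (0 : Int)).map PySem.Int.toChars).flatten = List.replicate k '0' := by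
  induction k with
  | zero => simp
  | succ k ih =>
    rw [List.replicate_succ, List.map_cons, List.flatten_cons, ih, List.replicate_succ]
    have h0 : PySem.Int.toChars 0 = ['0'] := by decide
    rw [h0]
    rfl

theorem flatten_len_01 (l : List Int) (h : ∀ b ∈ l, b = 0 ∨ b = 1) :
    ((l.map PySem.Int.toChars).flatten).length = l.length := by
  induction l with
  | nil => simp
  | cons b t ih =>
    simp only [List.map_cons, List.flatten_cons, List.length_append, List.length_cons]
    rw [toChars_01 b (h b (by simp)), ih (fun x hx => h x (by simp [hx]))]
    simp [Nat.add_comm]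

theorem flatten_chars_01 (l : List Int) (h : ∀ b ∈ l, b = 0 ∨ b = 1) :
    ∀ c ∈ (l.map PySem.Int.toChars).flatten, c = '0' ∨ c = '1' := by
  induction l with
  | nil => simp
  | cons b t ih =>
    simp only [List.map_cons, List.flatten_cons]
    intro c hc
    rcases List.mem_append.mp hc with hc | hc
    · rw [toChars_01 b (h b (by simp))] at hc
      simp at hc
      split at hc <;> simp [hc]
    · exact ih (fun x hx => h x (by simp [hx])) c hc

theorem zfill_no_sign (cs : List Char) (h : ∀ c ∈ cs, c = '0' ∨ c = '1') :
    PySem.Chars.zfill cs 8 = List.replicate (8 - cs.length) '0' ++ cs := by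
  cases cs with
  | nil => decide
  | cons c rest =>
    have hc := h c (by simp)
    have hne : ¬ (c = '+' ∨ c = '-') := by
      rcases hc with hc | hc <;> subst hc <;> decide
    by_cases hle : (8 : Int) ≤ ((c :: rest).length : Int)
    · simp only [PySem.Chars.zfill, if_pos hle]
      have hlen : 8 ≤ (c :: rest).length := by exact_mod_cast hle
      have h8 : 8 - (c :: rest).length = 0 := by omega
      rw [h8]
      simp
    · simp only [PySem.Chars.zfill, if_neg hle, if_neg hne]
      have h8 : (8 : Int).toNat = 8 := rfl
      rw [h8]

theorem dec2bin_eq (a : Int) : dec2binA a = dec2binB a := by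
  apply String.toList_inj.mp
  have hA : dec2binA a = strOf (dec2binA_pad (fullBits a)).reverse := by
    unfold dec2binA
    simp only [loopA_spec, List.nil_append]
    rfl
  rw [hA, pad_eq, List.reverse_append, List.reverse_replicate]
  unfold dec2binB
  rw [gB_eq a]
  have h01 : ∀ b ∈ (fullBits a).reverse, b = 0 ∨ b = 1 := by
    intro b hb; exact bits01 a b (List.mem_reverse.mp hb)
  rw [PySem.Str.toList_zfill]
  simp only [strOf_toList, strOf_append, String.toList_append]
  rw [zfill_no_sign _ (flatten_chars_01 _ h01), flatten_len_01 _ h01,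
      flatten_replicate_zero, List.length_reverse]

theorem join_empty_nil : PySem.Str.join "" [] = "" := by
  apply String.toList_inj.mp
  rw [PySem.Str.toList_join]
  simp [PySem.Chars.join_nil]

theorem join_empty_cons (p : String) (rest : List String) :
    PySem.Str.join "" (p :: rest) = p ++ PySem.Str.join "" rest := by
  apply String.toList_inj.mp
  rw [PySem.Str.toList_join, String.toList_append, PySem.Str.toList_join]
  cases rest with
  | nil => simp [PySem.Chars.join_nil, PySem.Chars.join_singleton]
  | cons q r =>
    rw [show List.map String.toList (p :: q :: r)
          = p.toList :: q.toList :: List.map String.toList r from rfl,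
        PySem.Chars.join_cons_cons]
    simp

theorem enum_cons {α : Type} (x : α) (xs : List α) (s : Int) :
    PySem.List.enumerate (x :: xs) s = (s, x) :: PySem.List.enumerate xs (s + 1) := by
  simp [PySem.List.enumerate]

def partsFrom (lista : List Int) (j : Nat) : String :=
  PySem.Str.join "" ((PySem.List.enumerate (lista.drop j) (j : Int)).map
    (fun p => dec2binB p.2 ++ (if p.1 ≠ 3 then "." else "")))

theorem loop_eq (lista : List Int) : ∀ (fuel : Nat) (j : Nat),
    lista.length - j ≤ fuel → ∀ s : String,
    (PySem.List.pyRange (j : Int) (lista.length : Int) 1).foldl (fun resultado x =>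
      if x ≠ 3 then resultado ++ (dec2binA (PySem.List.pyGetD lista x 0) ++ ".")
      else resultado ++ dec2binA (PySem.List.pyGetD lista x 0)) s
    = s ++ partsFrom lista j := by
  intro fuel
  induction fuel with
  | zero =>
    intro j hf s
    have hge : j ≥ lista.length := by omega
    rw [PySem.List.pyRange_one_eq_nil (by exact_mod_cast hge)]
    unfold partsFrom
    rw [List.drop_eq_nil_of_le hge]
    simp only [PySem.List.enumerate, List.map_nil, join_empty_nil]
    simp
  | succ fuel ih =>
    intro j hf s
    by_cases hge : j ≥ lista.length
    · rw [PySem.List.pyRange_one_eq_nil (by exact_mod_cast hge)]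
      unfold partsFrom
      rw [List.drop_eq_nil_of_le hge]
      simp only [PySem.List.enumerate, List.map_nil, join_empty_nil]
      simp
    · have hlt : j < lista.length := by omega
      rw [PySem.List.pyRange_one_cons (by exact_mod_cast hlt)]
      simp only [List.foldl_cons]
      have hcast : ((j : Int) + 1) = ((j + 1 : Nat) : Int) := by push_cast; ring
      rw [hcast, ih (j + 1) (by omega)]
      unfold partsFrom
      rw [List.drop_eq_getElem_cons hlt, enum_cons, List.map_cons, hcast, join_empty_cons]
      have hget : PySem.List.pyGetD lista ((j : Nat) : Int) 0 = lista[j] := by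
        rw [PySem.List.pyGetD_natCast]
        exact List.getD_eq_getElem lista 0 hlt
      rw [hget, dec2bin_eq]
      by_cases h3 : ((j : Int)) ≠ 3
      · rw [if_pos h3, if_pos h3]
        simp [String.append_assoc]
      · rw [if_neg h3, if_neg h3]
        simp [String.append_assoc]

-- ===== VERDICT (by name: the statement is the Claim_ definition above) =====
theorem coletar_spec : Claim_equal_coletar := by
  unfold Claim_equal_coletar
  intro n lista _
  unfold Spec_coletar coletar coletar_alt
  have h := loop_eq lista lista.length 0 (by omega) ""
  simp only [Nat.cast_zero] at h
  rw [h]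
  unfold partsFrom
  simp
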